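-- pv_equiv track=rewrite | github.com/YiqunPeng/leetcode_pro | solutions/1023_camelcase_matching.py | _same_upper
-- ===== SOURCE A (Python) =====
-- def _same_upper(qs, p):
--     res = []
--     pu = [i for i in p if 'A' <= i <= 'Z']
--     for q in qs:
--         qu = [i for i in q if 'A' <= i <= 'Z']
--         if pu == qu:
--             res.append(True)
--         else:
--             res.append(False)
--     return res
-- ===== SOURCE B (Python) =====
-- def _same_upper(qs, p):
--     pu = [c for c in p if 'A' <= c <= 'Z']
--     res = []
--     for q in qs:
--         j = 0
--         ok = True
--         for c in q:
--             if 'A' <= c <= 'Z':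
--                 if j < len(pu) and c == pu[j]:
--                     j += 1
--                 else:
--                     ok = False
--                     break
--         res.append(ok and j == len(pu))
--     return res
-- ===== Notes on version B (the rewrite author's own statement) =====
-- stated objective: alternative
-- what changed: Instead of materialising each query's uppercase-letter list and comparing it to the pattern's, B scans each query once with a pointer into the pattern's uppercase letters, failing early on the first mismatching or extra uppercase character.
import Mathlib
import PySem

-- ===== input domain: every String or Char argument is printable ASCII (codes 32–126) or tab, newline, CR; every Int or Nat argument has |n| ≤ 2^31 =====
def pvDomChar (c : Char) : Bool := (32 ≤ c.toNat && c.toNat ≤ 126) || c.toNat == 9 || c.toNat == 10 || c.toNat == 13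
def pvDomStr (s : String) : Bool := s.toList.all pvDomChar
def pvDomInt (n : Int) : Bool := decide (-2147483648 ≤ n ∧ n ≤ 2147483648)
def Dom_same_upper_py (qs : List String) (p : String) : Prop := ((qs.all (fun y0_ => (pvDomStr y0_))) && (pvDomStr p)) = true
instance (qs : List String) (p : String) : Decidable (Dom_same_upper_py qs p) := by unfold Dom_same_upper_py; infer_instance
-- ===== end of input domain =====

-- B replaces A's per-query uppercase-list build-and-compare with a single pointer scan
-- into the pattern's uppercase letters (alternative decomposition, same cost).


-- ===== PORT A =====
def same_upper_py (qs : List String) (p : String) : List Bool :=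
  let pu := p.toList.filter (fun c => decide ('A' ≤ c) && decide (c ≤ 'Z'))
  qs.foldl (fun res q =>
    let qu := q.toList.filter (fun c => decide ('A' ≤ c) && decide (c ≤ 'Z'))
    if pu == qu then res ++ [true] else res ++ [false]) []

-- ===== PORT B =====
-- scan the query's characters with a pointer j into pu; False on the first uppercase
-- char that does not match pu[j], True at the end iff the whole of pu was consumed
def pvAltScan (pu : List Char) (cs : List Char) (j : Nat) : Bool :=
  match cs with
  | [] => j == pu.length
  | c :: rest =>
    if decide ('A' ≤ c) && decide (c ≤ 'Z') then
      if h : j < pu.length then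
        if c == pu[j] then pvAltScan pu rest (j + 1) else false
      else false
    else pvAltScan pu rest j

def same_upper_py_alt (qs : List String) (p : String) : List Bool :=
  let pu := p.toList.filter (fun c => decide ('A' ≤ c) && decide (c ≤ 'Z'))
  qs.map (fun q => pvAltScan pu q.toList 0)

-- ===== PRECONDITION & SPEC =====
def Spec_same_upper_py (qs : List String) (p : String) (out : List Bool) : Prop := out = same_upper_py_alt qs p
instance (qs : List String) (p : String) (out : List Bool) : Decidable (Spec_same_upper_py qs p out) := by unfold Spec_same_upper_py; infer_instance

-- ===== CLAIM (what is proved, stated in full; the proofs are below) =====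
def Claim_equal_same_upper_py : Prop := ∀ (qs : List String) (p : String), Dom_same_upper_py qs p → Spec_same_upper_py qs p (same_upper_py qs p)

-- ===== LEMMAS AND PROOFS =====

-- the pointer scan decides whether the query's uppercase letters equal pu.drop j
theorem pvAltScan_eq_filter (pu : List Char) (cs : List Char) (j : Nat) (hj : j ≤ pu.length) :
    pvAltScan pu cs j = (cs.filter (fun c => decide ('A' ≤ c) && decide (c ≤ 'Z')) == pu.drop j) := by
  induction cs generalizing j with
  | nil =>
    simp only [pvAltScan, List.filter_nil]
    rw [Bool.eq_iff_iff]
    simp only [beq_iff_eq, List.nil_eq, List.drop_eq_nil_iff]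
    omega
  | cons c rest ih =>
    simp only [pvAltScan, List.filter_cons]
    by_cases hc : (decide ('A' ≤ c) && decide (c ≤ 'Z')) = true
    · simp only [hc, if_true]
      by_cases h : j < pu.length
      · simp only [dif_pos h]
        have hdrop : pu.drop j = pu[j] :: pu.drop (j + 1) := List.drop_eq_getElem_cons h
        by_cases hcb : c = pu[j]
        · subst hcb
          rw [if_pos (beq_self_eq_true _), ih (j + 1) h, hdrop, Bool.eq_iff_iff]
          simp only [beq_iff_eq, List.cons_eq_cons]
          tauto
        · rw [if_neg (by simp [hcb]), hdrop]
          symm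
          rw [beq_eq_false_iff_ne]
          exact fun hE => hcb (List.cons_eq_cons.mp hE).1
      · simp only [dif_neg h]
        have hje : j = pu.length := Nat.le_antisymm hj (Nat.le_of_not_lt h)
        subst hje
        simp
    · simp [hc, ih j hj]

theorem foldl_append_map (f : String → Bool) (qs : List String) (acc : List Bool) :
    qs.foldl (fun res q => res ++ [f q]) acc = acc ++ qs.map f := by
  induction qs generalizing acc with
  | nil => simp
  | cons q rest ih => simp [List.foldl_cons, ih, List.append_assoc]

-- ===== VERDICT (by name: the statement is the Claim_ definition above) =====
theorem main_fold_eq_map (pu : List Char) (qs : List String) :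
    qs.foldl (fun res q =>
      let qu := q.toList.filter (fun c => decide ('A' ≤ c) && decide (c ≤ 'Z'))
      if pu == qu then res ++ [true] else res ++ [false]) []
    = qs.map (fun q => pvAltScan pu q.toList 0) := by
  have hfun : (fun (res : List Bool) (q : String) =>
      let qu := q.toList.filter (fun c => decide ('A' ≤ c) && decide (c ≤ 'Z'))
      if pu == qu then res ++ [true] else res ++ [false])
      = (fun (res : List Bool) (q : String) => res ++ [pvAltScan pu q.toList 0]) := by
    funext res q
    have h0 := pvAltScan_eq_filter pu q.toList 0 (Nat.zero_le _)
    simp only [List.drop_zero] at h0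
    rw [h0]
    by_cases hq : pu = q.toList.filter (fun c => decide ('A' ≤ c) && decide (c ≤ 'Z'))
    · simp [hq]
    · simp [hq, Ne.symm hq]
  rw [hfun, foldl_append_map (fun q => pvAltScan pu q.toList 0) qs []]
  simp

theorem same_upper_py_spec : Claim_equal_same_upper_py := by
  intro qs p _
  unfold Spec_same_upper_py same_upper_py same_upper_py_alt
  exact main_fold_eq_map _ qs
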